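-- pv_equiv track=rewrite | github.com/sociallyencrypted/CSE101 | Labs/Lab 7/SamsGame.py | cn
-- ===== SOURCE A (Python) =====
-- def allEqual(l):
--     for x in l:
--         if x[-1] != l[0][-1]:
--             return False
--     return True
--
-- def cn(lst):
--     count = 0
--     while True:
--         if min(len(x) for x in lst) != 0:
--             if allEqual(lst):
--                 for x in range(len(lst)):
--                     lst[x] = lst[x][:-1]
--                 count += 1
--             else:
--                 return count
--         else:
--             return count
-- ===== SOURCE B (Python) =====
-- def cn(lst):
--     # Equivalence is about the return value; like A, this truncates lst's strings in place.
--     min_len = min(len(x) for x in lst)  # raises ValueError on empty lst, as A does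
--     count = 0
--     for col in zip(*(x[::-1] for x in lst)):
--         if all(e == col[0] for e in col):
--             count += 1
--         else:
--             break
--     if count:
--         for i in range(len(lst)):
--             lst[i] = lst[i][:len(lst[i]) - count]
--     return count
-- ===== Notes on version B (the rewrite author's own statement) =====
-- stated objective: idiomatic
-- what changed: Replaces A's repeated whole-list passes (recompute min, re-check last chars, rebuild every string per counted column) with one zip-transpose of the reversed strings scanned once, plus a single final truncation.
import Mathlib
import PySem

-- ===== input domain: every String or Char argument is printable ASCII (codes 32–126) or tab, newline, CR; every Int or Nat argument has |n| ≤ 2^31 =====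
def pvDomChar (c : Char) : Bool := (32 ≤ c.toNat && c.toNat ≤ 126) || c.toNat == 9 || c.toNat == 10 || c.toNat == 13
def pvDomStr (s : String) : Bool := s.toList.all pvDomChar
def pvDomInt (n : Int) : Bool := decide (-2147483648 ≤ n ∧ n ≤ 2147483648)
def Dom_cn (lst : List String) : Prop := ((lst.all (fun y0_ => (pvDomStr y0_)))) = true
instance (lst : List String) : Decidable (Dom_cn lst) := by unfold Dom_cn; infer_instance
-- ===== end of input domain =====

-- B replaces A's repeated whole-list truncate-and-rescan rounds with one right-to-left column
-- scan (transpose of the reversed strings) plus a single final truncation; both A and B mutate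
-- the Python list in place the same way, and the equivalence proved here is about the return value.

-- ===== PORT A =====
-- for x in l: if x[-1] != l[0][-1]: return False / return True
def allEqualA (l : List String) : Bool :=
  l.all (fun x => PySem.Str.pyGet? x (-1) == PySem.Str.pyGet? (l.headD "") (-1))

def stepA (lst : List String) : List String :=
  lst.map (fun x => PySem.Str.slice x none (some (-1)))

-- termination helper for the while-loop: each round drops the last char of every string
theorem cnLoop_dec (lst : List String) (m : Int)
    (hmin : PySem.List.min? (lst.map PySem.Str.len) (fun y => y) = some m) (hm : ¬ m = 0) :
    ((stepA lst).map (fun s => s.toList.length)).sum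
      < (lst.map (fun s => s.toList.length)).sum := by
  have hne : lst ≠ [] := by
    intro h
    rw [h, List.map_nil, (PySem.List.min?_eq_none_iff _ _).mpr rfl] at hmin
    cases hmin
  have hmem : m ∈ lst.map PySem.Str.len := PySem.List.min?_mem hmin
  have hm0 : 0 ≤ m := by
    rcases List.mem_map.mp hmem with ⟨x, _, hx⟩
    rw [← hx, PySem.Str.len_eq]; positivity
  have hone : ∀ x ∈ lst, 1 ≤ x.toList.length := by
    intro x hx
    have := PySem.List.min?_isMin hmin (PySem.Str.len x) (List.mem_map_of_mem hx)
    rw [PySem.Str.len_eq] at this; omega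
  rw [stepA, List.map_map]
  have hlen : ∀ x ∈ lst,
      ((fun s => s.toList.length) ∘ fun x => PySem.Str.slice x none (some (-1))) x
        = x.toList.length - 1 := by
    intro x _
    show (PySem.Str.slice x none (some (-1))).toList.length = x.toList.length - 1
    rw [PySem.Str.slice_to_neg_one, List.length_dropLast]
  rcases lst with _ | ⟨s, rest⟩
  · exact absurd rfl hne
  · simp only [List.map_cons, List.sum_cons, hlen s List.mem_cons_self]
    have h1 : 1 ≤ s.toList.length := hone s List.mem_cons_self
    have h2 : (rest.map ((fun s => s.toList.length) ∘
        fun x => PySem.Str.slice x none (some (-1)))).sum ≤ (rest.map (fun s => s.toList.length)).sum := by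
      apply List.sum_le_sum
      intro x hx
      rw [hlen x (List.mem_cons_of_mem _ hx)]
      omega
    omega

def cnLoop (lst : List String) (count : Int) : Int :=
  match hmin : PySem.List.min? (lst.map PySem.Str.len) (fun y => y) with
  | none => count  -- empty lst: Python's min() raises ValueError here (outside Pre_cn)
  | some m =>
    if hm : m ≠ 0 then
      if allEqualA lst then
        cnLoop (stepA lst) (count + 1)
      else count
    else count
termination_by (lst.map (fun s => s.toList.length)).sum
decreasing_by exact cnLoop_dec lst m hmin hm

def cn (lst : List String) : Int := cnLoop lst 0

-- ===== PORT B =====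
-- column i of zip(*(x[::-1] for x in lst)); the default is never consulted for i < min length
def colAt (revs : List (List Char)) (i : Nat) : List Char := revs.map (fun r => r.getD i ' ')

-- all(e == col[0] for e in col)
def colUniform (col : List Char) : Bool := col.all (fun e => e == col.headD ' ')

-- the for/break loop over the columns: n columns remain, current column index i
def countCols (revs : List (List Char)) (i : Nat) : Nat → Nat
  | 0 => 0
  | n + 1 => if colUniform (colAt revs i) then 1 + countCols revs (i + 1) n else 0

def cn_alt (lst : List String) : Int :=
  match PySem.List.min? (lst.map PySem.Str.len) (fun y => y) with
  | none => 0  -- empty lst: Python's min() raises ValueError here (outside Pre_cn)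
  | some m =>
    let revs := lst.map (fun x => x.toList.reverse)
    (countCols revs 0 m.toNat : Int)

-- ===== PRECONDITION & SPEC =====
-- Pre_cn excludes only the empty list, on which A's min() raises ValueError
def Pre_cn (lst : List String) : Prop := lst ≠ []
instance (lst : List String) : Decidable (Pre_cn lst) := by unfold Pre_cn; infer_instance
def pvWitness_cn : List String := ["ab", "cb"]
def Spec_cn (lst : List String) (out : Int) : Prop := out = cn_alt lst
instance (lst : List String) (out : Int) : Decidable (Spec_cn lst out) := by unfold Spec_cn; infer_instance

-- ===== CLAIM (what is proved, stated in full; the proofs are below) =====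
def Claim_equal_cn : Prop := ∀ (lst : List String), Dom_cn lst → Pre_cn lst → Spec_cn lst (cn lst)

-- ===== LEMMAS AND PROOFS =====

theorem colAt_map_tail (revs : List (List Char)) (i : Nat) :
    colAt (revs.map List.tail) i = colAt revs (i + 1) := by
  simp [colAt, List.map_map, Function.comp_def]

theorem countCols_shift (revs : List (List Char)) (i : Nat) :
    ∀ n, countCols (revs.map List.tail) i n = countCols revs (i + 1) n := by
  intro n
  induction n generalizing i with
  | zero => rfl
  | succ n ih => simp [countCols, colAt_map_tail, ih]

theorem pyGet_neg_one_eq (x : String) (hx : 1 ≤ x.toList.length) :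
    PySem.Str.pyGet? x (-1) = some (x.toList.reverse.getD 0 ' ') := by
  have h1 : PySem.Str.pyGet? x (-1) = x.toList.getLast? := by
    simp [PySem.Str.pyGet?, PySem.Chars.pyGet?, PySem.List.pyGet?_neg_one]
  have h2 : x.toList.getLast? = x.toList.reverse[0]? := by
    rw [← List.head?_reverse]; simp [List.head?_eq_getElem?]
  have h3 : 0 < x.toList.reverse.length := by simpa using hx
  rw [h1, h2, List.getElem?_eq_getElem h3, List.getD_eq_getElem _ _ h3]

theorem allEqual_eq_colUniform (lst : List String) (h1 : ∀ x ∈ lst, 1 ≤ x.toList.length) :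
    allEqualA lst = colUniform (colAt (lst.map (fun x => x.toList.reverse)) 0) := by
  rcases lst with _ | ⟨s, rest⟩
  · simp [allEqualA, colUniform, colAt]
  · have hs := h1 s List.mem_cons_self
    have hmap : colAt ((s :: rest).map (fun x => x.toList.reverse)) 0
        = (s :: rest).map (fun x => x.toList.reverse.getD 0 ' ') := by
      simp [colAt, List.map_map, Function.comp_def]
    unfold allEqualA colUniform
    rw [hmap, List.all_map]
    rw [show ((s :: rest).map (fun x => x.toList.reverse.getD 0 ' ')).headD ' '
        = s.toList.reverse.getD 0 ' ' from by rw [List.map_cons, List.headD_cons]]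
    rw [Bool.eq_iff_iff]
    simp only [List.all_eq_true, beq_iff_eq, Function.comp_def, List.headD_cons]
    refine forall_congr' fun x => ?_
    refine imp_congr_right fun hx => ?_
    rw [pyGet_neg_one_eq x (h1 x hx), pyGet_neg_one_eq s hs, Option.some_inj]

theorem foldl_min_sub (t : List Int) : ∀ x : Int,
    (t.map (fun a => a - 1)).foldl min (x - 1) = (t.foldl min x) - 1 := by
  induction t with
  | nil => intro x; rfl
  | cons b t ih =>
    intro x
    simp only [List.map_cons, List.foldl_cons]
    rw [min_sub_sub_right]
    exact ih (min x b)

theorem min?_map_sub_one (l : List Int) (m : Int)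
    (hmin : PySem.List.min? l (fun y => y) = some m) :
    PySem.List.min? (l.map (fun a => a - 1)) (fun y => y) = some (m - 1) := by
  rcases l with _ | ⟨x, t⟩
  · rw [(PySem.List.min?_eq_none_iff _ _).mpr rfl] at hmin; cases hmin
  · rw [PySem.List.min?_id_cons] at hmin
    rw [List.map_cons, PySem.List.min?_id_cons, foldl_min_sub, Option.some.inj hmin]

theorem len_step (x : String) (hx : 1 ≤ x.toList.length) :
    PySem.Str.len (PySem.Str.slice x none (some (-1))) = PySem.Str.len x - 1 := by
  rw [PySem.Str.len_eq, PySem.Str.len_eq, PySem.Str.slice_to_neg_one, List.length_dropLast]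
  omega

theorem loop_eq : ∀ (n : Nat) (lst : List String) (count : Int),
    PySem.List.min? (lst.map PySem.Str.len) (fun y => y) = some (n : Int) →
    cnLoop lst count = count + countCols (lst.map (fun x => x.toList.reverse)) 0 n := by
  intro n
  induction n with
  | zero =>
    intro lst count hmin
    rw [cnLoop]
    split
    · rename_i heq; rw [hmin] at heq; cases heq
    · rename_i m heq
      have hm : m = 0 := by
        rw [hmin] at heq
        have := Option.some.inj heq
        omega
      simp [hm, countCols]
  | succ n ih =>
    intro lst count hmin
    have hone : ∀ x ∈ lst, 1 ≤ x.toList.length := by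
      intro x hx
      have := PySem.List.min?_isMin hmin (PySem.Str.len x) (List.mem_map_of_mem hx)
      rw [PySem.Str.len_eq] at this
      have : ((n : Int) + 1 : Int) ≤ (x.toList.length : Int) := by push_cast at this ⊢; omega
      omega
    rw [cnLoop]
    split
    · rename_i heq; rw [hmin] at heq; cases heq
    · rename_i m heq
      have hm : m = (n : Int) + 1 := by
        rw [hmin] at heq
        have := Option.some.inj heq
        push_cast at this; omega
      have hmne : ¬ m = 0 := by omega
      rw [dif_pos hmne]
      by_cases hall : allEqualA lst = true
      · rw [if_pos hall]
        have hmap : (stepA lst).map PySem.Str.len = (lst.map PySem.Str.len).map (fun a => a - 1) := by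
          rw [stepA, List.map_map, List.map_map]
          exact List.map_congr_left (fun x hx => len_step x (hone x hx))
        have hstep : PySem.List.min? ((stepA lst).map PySem.Str.len) (fun y => y)
            = some ((n : Nat) : Int) := by
          rw [hmap, min?_map_sub_one _ _ hmin]
          congr 1; push_cast; omega
        rw [ih (stepA lst) (count + 1) hstep]
        have hrev : (stepA lst).map (fun x => x.toList.reverse)
            = (lst.map (fun x => x.toList.reverse)).map List.tail := by
          rw [stepA, List.map_map, List.map_map]
          refine List.map_congr_left (fun x _ => ?_)
          show (PySem.Str.slice x none (some (-1))).toList.reverse = x.toList.reverse.tail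
          rw [PySem.Str.slice_to_neg_one, List.tail_reverse]
        rw [hrev, countCols_shift]
        have hcol : colUniform (colAt (lst.map (fun x => x.toList.reverse)) 0) = true := by
          rw [← allEqual_eq_colUniform lst hone]; exact hall
        rw [countCols, if_pos hcol]
        push_cast; ring
      · rw [if_neg hall]
        have hcol : colUniform (colAt (lst.map (fun x => x.toList.reverse)) 0) = false := by
          rw [← allEqual_eq_colUniform lst hone]; simpa using hall
        rw [countCols, if_neg (by simp [hcol])]
        simp

-- ===== VERDICT (by name: the statement is the Claim_ definition above) =====
theorem cn_spec : Claim_equal_cn := by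
  intro lst _ hpre
  unfold Spec_cn cn cn_alt
  rcases hmin : PySem.List.min? (lst.map PySem.Str.len) (fun y => y) with _ | m
  · exact absurd (List.map_eq_nil_iff.mp ((PySem.List.min?_eq_none_iff _ _).mp hmin)) hpre
  · have hm0 : 0 ≤ m := by
      rcases List.mem_map.mp (PySem.List.min?_mem hmin) with ⟨x, _, hx⟩
      rw [← hx, PySem.Str.len_eq]; positivity
    rw [loop_eq m.toNat lst 0 (by rw [hmin]; congr 1; omega)]
    simp
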